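-- pv_equiv track=rewrite | github.com/abcd5251/PawXAI_Trading | dydx_aster_bot.py | _strip_scheme
-- ===== SOURCE A (Python) =====
-- def _strip_scheme(host: str | None) -> str | None:
--     if not host:
--         return host
--     for p in ("https://", "http://", "grpc://", "grpcs://"):
--         if host.startswith(p):
--             host = host[len(p):]
--             break
--     return host.strip("/")
-- ===== SOURCE B (Python) =====
-- _SCHEMES = ("https", "http", "grpc", "grpcs")
--
--
-- def _strip_scheme(host):
--     if not host:
--         return host
--     sep = host.find("://")
--     if sep != -1 and host[:sep] in _SCHEMES:
--         host = host[sep + 3:]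
--     return host.strip("/")
-- ===== Notes on version B (the rewrite author's own statement) =====
-- stated objective: alternative
-- what changed: Instead of looping over the four full scheme prefixes with startswith, B locates the first scheme separator with a single find and strips it when the text before it is one of the four scheme names.
import Mathlib
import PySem

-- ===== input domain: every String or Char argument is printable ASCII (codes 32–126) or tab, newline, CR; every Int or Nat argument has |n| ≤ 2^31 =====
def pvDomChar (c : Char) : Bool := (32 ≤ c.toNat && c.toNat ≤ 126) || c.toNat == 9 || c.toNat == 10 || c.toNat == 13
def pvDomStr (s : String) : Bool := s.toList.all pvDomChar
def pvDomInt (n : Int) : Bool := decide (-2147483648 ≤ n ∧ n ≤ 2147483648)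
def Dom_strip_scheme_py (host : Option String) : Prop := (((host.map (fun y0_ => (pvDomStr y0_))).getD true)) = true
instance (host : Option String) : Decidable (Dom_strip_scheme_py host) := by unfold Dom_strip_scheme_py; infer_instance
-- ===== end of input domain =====

-- B replaces A's loop of four anchored startswith tests by one find of "://" plus a
-- scheme-name membership test (objective: alternative, same cost).

-- ===== PORT A =====
-- the for-loop with break: try each prefix in order, strip the first that matches
def pvStripLoopA (h : String) : List String → String
  | [] => h
  | p :: ps =>
    if PySem.Str.startswith h p then PySem.Str.slice h (some (PySem.Str.len p)) none
    else pvStripLoopA h ps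

def strip_scheme_py (host : Option String) : Option String :=
  match host with
  | none => none
  | some h =>
    if h = "" then some h    -- `if not host: return host`
    else
      some (PySem.Str.stripChars (pvStripLoopA h ["https://", "http://", "grpc://", "grpcs://"]) "/")

-- ===== PORT B =====
def strip_scheme_py_alt (host : Option String) : Option String :=
  match host with
  | none => none
  | some h =>
    if h = "" then some h
    else
      let sep := PySem.Str.find h "://"
      let h2 :=
        if sep ≠ -1 ∧ PySem.Str.slice h none (some sep) ∈ (["https", "http", "grpc", "grpcs"] : List String)
        then PySem.Str.slice h (some (sep + 3)) none
        else h
      some (PySem.Str.stripChars h2 "/")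

-- ===== PRECONDITION & SPEC =====
def Spec_strip_scheme_py (host : Option String) (out : Option String) : Prop := out = strip_scheme_py_alt host
instance (host : Option String) (out : Option String) : Decidable (Spec_strip_scheme_py host out) := by unfold Spec_strip_scheme_py; infer_instance

-- ===== CLAIM (what is proved, stated in full; the proofs are below) =====
def Claim_equal_strip_scheme_py : Prop := ∀ (host : Option String), Dom_strip_scheme_py host → Spec_strip_scheme_py host (strip_scheme_py host)

-- ===== LEMMAS AND PROOFS =====

-- find points at k if the pattern occurs at k and at no earlier index
theorem pv_find_eq_of_first (s sub : List Char) (k : Nat)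
    (h1 : sub <+: s.drop k) (h2 : ∀ i < k, ¬ sub <+: s.drop i) :
    PySem.Chars.find s sub = (k : Int) := by
  have hinf : sub <:+: s := h1.isInfix.trans (List.drop_suffix k s).isInfix
  have hne : PySem.Chars.find s sub ≠ -1 := (PySem.Chars.find_ne_neg_one_iff s sub).mpr hinf
  have hle : -1 ≤ PySem.Chars.find s sub := PySem.Chars.neg_one_le_find s sub
  have hnn : 0 ≤ PySem.Chars.find s sub := by omega
  obtain ⟨hp, hmin⟩ := PySem.Chars.find_spec hnn
  rcases lt_trichotomy (PySem.Chars.find s sub).toNat k with hlt | heq | hgt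
  · exact absurd hp (h2 _ hlt)
  · omega
  · exact absurd h1 (hmin k hgt)

-- the first "://" in scheme ++ "://" ++ t sits right after the scheme, if ':' ∉ scheme
theorem pv_find_at (a t : List Char) (hc : ':' ∉ a) :
    PySem.Chars.find (a ++ [':', '/', '/'] ++ t) [':', '/', '/'] = (a.length : Int) := by
  apply pv_find_eq_of_first
  · rw [List.append_assoc, List.drop_left]
    exact List.prefix_append _ _
  · intro i hi hpre
    rw [List.append_assoc, List.drop_append_of_le_length (by omega)] at hpre
    rw [List.drop_eq_getElem_cons (by omega)] at hpre
    obtain ⟨r', hr'⟩ := hpre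
    simp only [List.cons_append, List.nil_append] at hr'
    injection hr' with hhead _
    exact hc (hhead ▸ List.getElem_mem _)

-- glue a computed take and a prefix of the drop back into a prefix of the whole list
theorem pv_take_drop_pref (s : List Char) (m : Nat) (a b r : List Char)
    (ht : s.take m = a) (hd : s.drop m = b ++ r) : a ++ b <+: s :=
  ⟨r, by rw [List.append_assoc, ← ht, ← hd, List.take_append_drop]⟩

-- when h = scheme ++ "://" ++ t, B's find and pre-slice compute to the scheme
theorem pv_pos_case (h scheme : String) (t : List Char)
    (hsplit : h.toList = scheme.toList ++ [':', '/', '/'] ++ t)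
    (hcolon : ':' ∉ scheme.toList) :
    PySem.Str.find h "://" = (scheme.toList.length : Int) ∧
    PySem.Str.slice h none (some (PySem.Str.find h "://")) = scheme := by
  have hpat : "://".toList = [':', '/', '/'] := by decide
  have hfind : PySem.Str.find h "://" = (scheme.toList.length : Int) := by
    rw [PySem.Str.find_eq, hpat, hsplit]
    exact pv_find_at _ _ hcolon
  refine ⟨hfind, ?_⟩
  rw [← String.toList_inj, PySem.Str.toList_slice, PySem.Chars.slice_eq_listSlice, hfind,
    PySem.List.slice_to_natCast, hsplit, List.append_assoc]
  exact List.take_left' rfl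

-- if none of the four prefix tests fires, B's branch condition is false
theorem pv_no_scheme (h : String)
    (h1 : ¬ PySem.Str.startswith h "https://" = true)
    (h2 : ¬ PySem.Str.startswith h "http://" = true)
    (h3 : ¬ PySem.Str.startswith h "grpc://" = true)
    (h4 : ¬ PySem.Str.startswith h "grpcs://" = true) :
    ¬ (PySem.Str.find h "://" ≠ -1 ∧
        PySem.Str.slice h none (some (PySem.Str.find h "://")) ∈ (["https", "http", "grpc", "grpcs"] : List String)) := by
  rintro ⟨hne, hmem⟩
  rw [PySem.Str.find_eq] at hne
  have hle : -1 ≤ PySem.Chars.find h.toList "://".toList := PySem.Chars.neg_one_le_find _ _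
  have hnn : 0 ≤ PySem.Chars.find h.toList "://".toList := by omega
  obtain ⟨hp, -⟩ := PySem.Chars.find_spec hnn
  obtain ⟨r, hr⟩ := hp
  have hsl : ∀ sch : String, PySem.Str.slice h none (some (PySem.Str.find h "://")) = sch →
      h.toList.take (PySem.Chars.find h.toList "://".toList).toNat = sch.toList := by
    intro sch he
    have := congrArg String.toList he
    rwa [PySem.Str.toList_slice, PySem.Chars.slice_eq_listSlice, PySem.Str.find_eq,
      show PySem.Chars.find h.toList "://".toList
        = ((PySem.Chars.find h.toList "://".toList).toNat : Int) by omega,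
      PySem.List.slice_to_natCast] at this
  have hpref : ∀ sch : String, PySem.Str.slice h none (some (PySem.Str.find h "://")) = sch →
      sch.toList ++ "://".toList <+: h.toList := by
    intro sch he
    exact pv_take_drop_pref _ _ _ _ _ (hsl sch he) hr.symm
  simp only [List.mem_cons, List.not_mem_nil, or_false] at hmem
  rcases hmem with he | he | he | he
  · exact h1 (by
      rw [PySem.Str.startswith_eq, PySem.Chars.startswith_iff]
      have := hpref _ he
      rwa [show "https".toList ++ "://".toList = "https://".toList by decide] at this)
  · exact h2 (by
      rw [PySem.Str.startswith_eq, PySem.Chars.startswith_iff]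
      have := hpref _ he
      rwa [show "http".toList ++ "://".toList = "http://".toList by decide] at this)
  · exact h3 (by
      rw [PySem.Str.startswith_eq, PySem.Chars.startswith_iff]
      have := hpref _ he
      rwa [show "grpc".toList ++ "://".toList = "grpc://".toList by decide] at this)
  · exact h4 (by
      rw [PySem.Str.startswith_eq, PySem.Chars.startswith_iff]
      have := hpref _ he
      rwa [show "grpcs".toList ++ "://".toList = "grpcs://".toList by decide] at this)

-- the heart: A's prefix loop equals B's find-based strip on every string
theorem pv_core (h : String) :
    pvStripLoopA h ["https://", "http://", "grpc://", "grpcs://"]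
      = if PySem.Str.find h "://" ≠ -1 ∧
            PySem.Str.slice h none (some (PySem.Str.find h "://")) ∈ (["https", "http", "grpc", "grpcs"] : List String)
        then PySem.Str.slice h (some (PySem.Str.find h "://" + 3)) none
        else h := by
  by_cases c1 : PySem.Str.startswith h "https://" = true
  · obtain ⟨t, ht⟩ := (PySem.Chars.startswith_iff _ _).mp ((PySem.Str.startswith_eq _ _) ▸ c1)
    have hsplit : h.toList = "https".toList ++ [':', '/', '/'] ++ t := by
      rw [← ht, show "https://".toList = "https".toList ++ [':', '/', '/'] by decide,
        List.append_assoc]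
    obtain ⟨hfind, hsl⟩ := pv_pos_case h "https" t hsplit (by decide)
    rw [if_pos ⟨by rw [hfind]; decide, by rw [hsl]; decide⟩]
    simp only [pvStripLoopA, if_pos c1]
    rw [hfind]
    rfl
  all_goals by_cases c2 : PySem.Str.startswith h "http://" = true
  · obtain ⟨t, ht⟩ := (PySem.Chars.startswith_iff _ _).mp ((PySem.Str.startswith_eq _ _) ▸ c2)
    have hsplit : h.toList = "http".toList ++ [':', '/', '/'] ++ t := by
      rw [← ht, show "http://".toList = "http".toList ++ [':', '/', '/'] by decide,
        List.append_assoc]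
    obtain ⟨hfind, hsl⟩ := pv_pos_case h "http" t hsplit (by decide)
    rw [if_pos ⟨by rw [hfind]; decide, by rw [hsl]; decide⟩]
    simp only [pvStripLoopA, if_neg c1, if_pos c2]
    rw [hfind]
    rfl
  all_goals by_cases c3 : PySem.Str.startswith h "grpc://" = true
  · obtain ⟨t, ht⟩ := (PySem.Chars.startswith_iff _ _).mp ((PySem.Str.startswith_eq _ _) ▸ c3)
    have hsplit : h.toList = "grpc".toList ++ [':', '/', '/'] ++ t := by
      rw [← ht, show "grpc://".toList = "grpc".toList ++ [':', '/', '/'] by decide,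
        List.append_assoc]
    obtain ⟨hfind, hsl⟩ := pv_pos_case h "grpc" t hsplit (by decide)
    rw [if_pos ⟨by rw [hfind]; decide, by rw [hsl]; decide⟩]
    simp only [pvStripLoopA, if_neg c1, if_neg c2, if_pos c3]
    rw [hfind]
    rfl
  all_goals by_cases c4 : PySem.Str.startswith h "grpcs://" = true
  · obtain ⟨t, ht⟩ := (PySem.Chars.startswith_iff _ _).mp ((PySem.Str.startswith_eq _ _) ▸ c4)
    have hsplit : h.toList = "grpcs".toList ++ [':', '/', '/'] ++ t := by
      rw [← ht, show "grpcs://".toList = "grpcs".toList ++ [':', '/', '/'] by decide,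
        List.append_assoc]
    obtain ⟨hfind, hsl⟩ := pv_pos_case h "grpcs" t hsplit (by decide)
    rw [if_pos ⟨by rw [hfind]; decide, by rw [hsl]; decide⟩]
    simp only [pvStripLoopA, if_neg c1, if_neg c2, if_neg c3, if_pos c4]
    rw [hfind]
    rfl
  · rw [if_neg (pv_no_scheme h c1 c2 c3 c4)]
    simp only [pvStripLoopA, if_neg c1, if_neg c2, if_neg c3, if_neg c4]

-- ===== VERDICT (by name: the statement is the Claim_ definition above) =====
theorem strip_scheme_py_spec : Claim_equal_strip_scheme_py := by
  intro host _
  unfold Spec_strip_scheme_py strip_scheme_py strip_scheme_py_alt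
  match host with
  | none => rfl
  | some h =>
    by_cases hemp : h = ""
    · simp [hemp]
    · simp only [if_neg hemp, Option.some.injEq]
      rw [pv_core]
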